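-- pv_equiv track=rewrite | github.com/mzookim05/sogang-notices-to-notion | scripts/utils.py | is_allowed_attachment_host
-- ===== SOURCE A (Python) =====
-- def is_allowed_attachment_host(host: str, allowed_domains: tuple[str, ...]) -> bool:
--     if not host:
--         return False
--     host = host.split(":", 1)[0]
--     for domain in allowed_domains:
--         if host == domain or host.endswith(f".{domain}"):
--             return True
--     return False
-- ===== SOURCE B (Python) =====
-- def is_allowed_attachment_host(host: str, allowed_domains: tuple[str, ...]) -> bool:
--     if not host:
--         return False
--     host = host.split(":", 1)[0]
--     allowed = set(allowed_domains)
--     n = len(host)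
--     for j in range(n + 1):
--         if (j == 0 or host[j - 1] == ".") and host[j:] in allowed:
--             return True
--     return False
-- ===== Notes on version B (the rewrite author's own statement) =====
-- stated objective: alternative
-- what changed: Instead of scanning allowed_domains and testing == / endswith('.'+domain) for each, B builds a set of the domains once and walks the host's dot-boundary cut positions, testing each dot-suffix of the host for membership in the set.
import Mathlib
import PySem

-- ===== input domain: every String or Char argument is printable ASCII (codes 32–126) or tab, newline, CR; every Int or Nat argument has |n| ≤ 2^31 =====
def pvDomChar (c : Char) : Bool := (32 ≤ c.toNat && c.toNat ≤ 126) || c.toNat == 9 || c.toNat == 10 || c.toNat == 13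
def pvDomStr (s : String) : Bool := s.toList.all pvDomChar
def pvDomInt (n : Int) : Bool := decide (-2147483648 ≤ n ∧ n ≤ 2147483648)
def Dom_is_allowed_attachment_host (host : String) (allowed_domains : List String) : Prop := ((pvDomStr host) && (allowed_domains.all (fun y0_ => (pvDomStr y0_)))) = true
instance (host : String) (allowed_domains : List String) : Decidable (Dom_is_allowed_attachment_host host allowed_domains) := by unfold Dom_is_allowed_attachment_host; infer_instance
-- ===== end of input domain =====

-- B replaces A's scan over allowed_domains (== / endswith per domain) by one pass over the
-- host's own dot-boundary suffix positions, tested against a set of the domains (objective: alternative).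

-- shared helper: the identical line `host = host.split(":", 1)[0]` of both Pythons
def pvStripPort (h : List Char) : List Char :=
  (PySem.Chars.splitOnMax h [':'] 1).headD []

-- ===== PORT A =====
def pvLoopA (h : List Char) : List String → Bool
  | [] => false
  | d :: rest =>
    if h = d.toList ∨ PySem.Chars.endswith h ('.' :: d.toList) = true then true
    else pvLoopA h rest

def is_allowed_attachment_host (host : String) (allowed_domains : List String) : Bool :=
  if host.toList = [] then false
  else pvLoopA (pvStripPort host.toList) allowed_domains

-- ===== PORT B =====
def pvLoopB (h : List Char) (allowed : PySem.Set String) : List Int → Bool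
  | [] => false
  | j :: rest =>
    if ((j == 0 || PySem.List.pyGet? h (j - 1) == some '.')
        && PySem.Set.contains allowed (String.ofList (PySem.List.slice h (some j) none))) then true
    else pvLoopB h allowed rest

def is_allowed_attachment_host_alt (host : String) (allowed_domains : List String) : Bool :=
  if host.toList = [] then false
  else
    let h := pvStripPort host.toList
    let allowed := PySem.Set.ofList allowed_domains
    pvLoopB h allowed (PySem.List.pyRange 0 ((h.length : Int) + 1) 1)

-- ===== PRECONDITION & SPEC =====
def Spec_is_allowed_attachment_host (host : String) (allowed_domains : List String) (out : Bool) : Prop := out = is_allowed_attachment_host_alt host allowed_domains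
instance (host : String) (allowed_domains : List String) (out : Bool) : Decidable (Spec_is_allowed_attachment_host host allowed_domains out) := by unfold Spec_is_allowed_attachment_host; infer_instance

-- ===== CLAIM (what is proved, stated in full; the proofs are below) =====
def Claim_equal_is_allowed_attachment_host : Prop := ∀ (host : String) (allowed_domains : List String), Dom_is_allowed_attachment_host host allowed_domains → Spec_is_allowed_attachment_host host allowed_domains (is_allowed_attachment_host host allowed_domains)

-- ===== LEMMAS AND PROOFS =====

theorem pvLoopA_true_iff (h : List Char) (ds : List String) :
    pvLoopA h ds = true ↔
      ∃ d ∈ ds, h = d.toList ∨ PySem.Chars.endswith h ('.' :: d.toList) = true := by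
  induction ds with
  | nil => simp [pvLoopA]
  | cons d rest ih =>
    simp only [pvLoopA]
    split_ifs with hc
    · exact iff_of_true rfl ⟨d, List.mem_cons_self, hc⟩
    · rw [ih]
      constructor
      · rintro ⟨e, he, hcond⟩; exact ⟨e, List.mem_cons_of_mem _ he, hcond⟩
      · rintro ⟨e, he, hcond⟩
        rcases List.mem_cons.mp he with rfl | he'
        · exact absurd hcond hc
        · exact ⟨e, he', hcond⟩

theorem pvLoopB_true_iff (h : List Char) (s : PySem.Set String) (js : List Int) :
    pvLoopB h s js = true ↔
      ∃ j ∈ js, ((j == 0 || PySem.List.pyGet? h (j - 1) == some '.')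
        && PySem.Set.contains s (String.ofList (PySem.List.slice h (some j) none))) = true := by
  induction js with
  | nil => simp [pvLoopB]
  | cons j rest ih =>
    simp only [pvLoopB]
    split_ifs with hc
    · exact iff_of_true rfl ⟨j, List.mem_cons_self, hc⟩
    · rw [ih]
      constructor
      · rintro ⟨e, he, hcond⟩; exact ⟨e, List.mem_cons_of_mem _ he, hcond⟩
      · rintro ⟨e, he, hcond⟩
        rcases List.mem_cons.mp he with rfl | he'
        · exact absurd hcond hc
        · exact ⟨e, he', hcond⟩

-- D is the full host or a dot-boundary suffix of it  ↔  some cut position j witnesses it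
theorem pv_suffix_iff (h D : List Char) :
    (h = D ∨ ('.' :: D) <:+ h) ↔
      ∃ j : Nat, j ≤ h.length ∧ (j = 0 ∨ h[j-1]? = some '.') ∧ h.drop j = D := by
  constructor
  · rintro (rfl | ⟨p, hp⟩)
    · exact ⟨0, Nat.zero_le _, Or.inl rfl, rfl⟩
    · refine ⟨p.length + 1, ?_, Or.inr ?_, ?_⟩
      · subst hp; simp
      · subst hp; simp
      · subst hp; simp
  · rintro ⟨j, hj, hbdry, rfl⟩
    cases j with
    | zero => exact Or.inl (by simp)
    | succ k =>
      right
      have hdot : h[k]? = some '.' := by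
        rcases hbdry with h0 | hdot
        · exact absurd h0 (Nat.succ_ne_zero k)
        · simpa using hdot
      refine ⟨h.take k, ?_⟩
      have h1 : h.take (k + 1) = h.take k ++ ['.'] := by
        rw [List.take_add_one, hdot]; rfl
      have h2 := List.take_append_drop (k + 1) h
      rw [h1] at h2
      simpa using h2

theorem pv_exists_iff (h : List Char) (ds : List String) :
    (∃ d ∈ ds, h = d.toList ∨ PySem.Chars.endswith h ('.' :: d.toList) = true) ↔
      ∃ j ∈ PySem.List.pyRange 0 ((h.length : Int) + 1) 1,
        ((j == 0 || PySem.List.pyGet? h (j - 1) == some '.')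
          && PySem.Set.contains (PySem.Set.ofList ds)
               (String.ofList (PySem.List.slice h (some j) none))) = true := by
  constructor
  · rintro ⟨d, hd, hcond⟩
    rw [PySem.Chars.endswith_iff] at hcond
    obtain ⟨j, hj, hbdry, hdrop⟩ := (pv_suffix_iff h d.toList).mp hcond
    refine ⟨(j : Int), ?_, ?_⟩
    · rw [PySem.List.mem_pyRange_one]
      exact ⟨Int.natCast_nonneg j, by exact_mod_cast Nat.lt_succ_of_le hj⟩
    · rw [Bool.and_eq_true]
      refine ⟨?_, ?_⟩
      · cases j with
        | zero => simp
        | succ m =>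
          have hdot : h[m]? = some '.' := by
            rcases hbdry with h0 | hdot
            · exact absurd h0 (Nat.succ_ne_zero m)
            · simpa using hdot
          have hcast : ((m + 1 : Nat) : Int) - 1 = ((m : Nat) : Int) := by omega
          rw [Bool.or_eq_true, hcast, PySem.List.pyGet?_natCast, hdot]
          simp
      · rw [PySem.List.slice_from_natCast, hdrop, PySem.Set.contains_iff,
            PySem.Set.mem_ofList]
        have : String.ofList d.toList = d := by
          apply String.toList_injective; simp
        rwa [this]
  · rintro ⟨j, hjmem, hcond⟩
    rw [PySem.List.mem_pyRange_one] at hjmem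
    obtain ⟨k, rfl⟩ : ∃ k : Nat, j = (k : Int) := ⟨j.toNat, by omega⟩
    have hk : k ≤ h.length := by exact_mod_cast Int.lt_add_one_iff.mp hjmem.2
    rw [Bool.and_eq_true] at hcond
    obtain ⟨hbdry, hmem⟩ := hcond
    rw [PySem.List.slice_from_natCast, PySem.Set.contains_iff, PySem.Set.mem_ofList] at hmem
    refine ⟨String.ofList (h.drop k), hmem, ?_⟩
    rw [PySem.Chars.endswith_iff]
    apply (pv_suffix_iff h (String.ofList (h.drop k)).toList).mpr
    refine ⟨k, hk, ?_, by simp⟩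
    cases k with
    | zero => exact Or.inl rfl
    | succ m =>
      right
      have hdot : PySem.List.pyGet? h (((m + 1 : Nat) : Int) - 1) = some '.' := by
        rcases (by simpa using hbdry : ((m + 1 : Nat) : Int) = 0 ∨
            PySem.List.pyGet? h (((m + 1 : Nat) : Int) - 1) = some '.') with h0 | hdot
        · exact absurd h0 (by omega)
        · exact hdot
      have hcast : ((m + 1 : Nat) : Int) - 1 = ((m : Nat) : Int) := by omega
      rw [hcast, PySem.List.pyGet?_natCast] at hdot
      simpa using hdot

-- ===== VERDICT (by name: the statement is the Claim_ definition above) =====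
theorem is_allowed_attachment_host_spec : Claim_equal_is_allowed_attachment_host := by
  intro host allowed_domains _
  unfold Spec_is_allowed_attachment_host
  unfold is_allowed_attachment_host is_allowed_attachment_host_alt
  split_ifs with h0
  · rfl
  · rw [Bool.eq_iff_iff, pvLoopA_true_iff, pvLoopB_true_iff]
    exact pv_exists_iff _ _
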